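-- pv_equiv track=rewrite | github.com/Bladhard/modbus-client | energycenter/grabber_DIA.NE/ECDR/main.py | group_registers
-- ===== SOURCE A (Python) =====
-- def group_registers(data):
--     mapping = {
--         "M01": range(1, 20),
--         "M02": range(20, 39),
--         "M09": range(39, 58),
--         "M10": range(58, 77),
--         "M11": range(77, 96),
--         "M12": range(96, 115),
--         "M13": range(115, 134),
--     }
--     result = {}
--     for module, r_range in mapping.items():
--         module_data = {}
--         new_index = 1
--         for i in r_range:
--             key = "R{}".format(i)
--             if key in data:
--                 module_data["R{}".format(new_index)] = data[key]
--                 new_index += 1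
--         result[module] = module_data
--     return result
-- ===== SOURCE B (Python) =====
-- def group_registers(data):
--     module_names = ["M01", "M02", "M09", "M10", "M11", "M12", "M13"]
--     buckets = {m: [] for m in module_names}
--     for key in data:
--         if key[:1] != "R":
--             continue
--         tail = key[1:]
--         try:
--             i = int(tail)
--         except ValueError:
--             continue
--         if str(i) != tail or not (1 <= i <= 133):
--             continue
--         buckets[module_names[(i - 1) // 19]].append(i)
--     return {
--         m: {"R{}".format(j): data["R{}".format(i)]
--             for j, i in enumerate(sorted(buckets[m]), 1)}
--         for m in module_names
--     }
-- ===== Notes on version B (the rewrite author's own statement) =====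
-- stated objective: alternative
-- what changed: Instead of scanning all 133 candidate register names per fixed module range against the dict, B makes one data-driven pass over the dict's keys, parses each canonical 'R<i>' key (round-trip int check, 1<=i<=133), buckets i by module via (i-1)//19, then sorts each bucket and renumbers.
import Mathlib
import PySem

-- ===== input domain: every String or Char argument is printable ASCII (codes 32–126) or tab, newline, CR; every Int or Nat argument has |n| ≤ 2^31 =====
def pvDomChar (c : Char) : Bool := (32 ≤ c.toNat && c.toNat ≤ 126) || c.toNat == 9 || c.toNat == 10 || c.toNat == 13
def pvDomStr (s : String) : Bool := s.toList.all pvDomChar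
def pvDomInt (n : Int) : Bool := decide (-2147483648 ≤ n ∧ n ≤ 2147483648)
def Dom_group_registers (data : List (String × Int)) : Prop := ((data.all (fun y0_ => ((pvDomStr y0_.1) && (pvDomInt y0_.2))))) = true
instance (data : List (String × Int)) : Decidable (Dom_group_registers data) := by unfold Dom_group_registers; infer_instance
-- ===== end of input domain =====

-- B replaces A's per-module scan over all 133 candidate register names by one data-driven
-- pass over the dict's keys (parse canonical "R<i>", bucket by (i-1)//19, sort, renumber);
-- objective: alternative decomposition, same exact result.

-- ===== PORT A =====
-- "R{}".format(i)
def pvRkey (i : Int) : String := "R" ++ PySem.Int.toStr i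

def pvMapping : List (String × List Int) :=
  [("M01", PySem.List.pyRange 1 20 1),
   ("M02", PySem.List.pyRange 20 39 1),
   ("M09", PySem.List.pyRange 39 58 1),
   ("M10", PySem.List.pyRange 58 77 1),
   ("M11", PySem.List.pyRange 77 96 1),
   ("M12", PySem.List.pyRange 96 115 1),
   ("M13", PySem.List.pyRange 115 134 1)]

-- body of A's inner loop over the (module_data, new_index) state
def pvStepA (d : PySem.Dict String Int) (st : PySem.Dict String Int × Int) (i : Int) :
    PySem.Dict String Int × Int :=
  if d.contains (pvRkey i) then
    (st.1.insert (pvRkey st.2) (d.getD (pvRkey i) 0), st.2 + 1)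
  else st

def pvInnerA (d : PySem.Dict String Int) (r : List Int) : PySem.Dict String Int × Int :=
  r.foldl (pvStepA d) (PySem.Dict.empty, 1)

def group_registers (data : List (String × Int)) : List (String × List (String × Int)) :=
  let d := PySem.Dict.ofList data
  let result := pvMapping.foldl
    (fun res mr => res.insert mr.1 (pvInnerA d mr.2).1)
    (PySem.Dict.empty : PySem.Dict String (PySem.Dict String Int))
  result.items.map (fun p => (p.1, p.2.items))

-- ===== PORT B =====
def pvModuleNames : List String := ["M01", "M02", "M09", "M10", "M11", "M12", "M13"]

-- the per-key acceptance test of B's loop: key[:1] == "R", i = int(key[1:]) parses,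
-- str(i) == key[1:], 1 <= i <= 133
def pvParse? (key : String) : Option Int :=
  if PySem.Str.slice key none (some 1) ≠ "R" then none
  else
    match PySem.Int.ofStr? (PySem.Str.slice key (some 1) none) with
    | none => none
    | some i =>
      if PySem.Int.toStr i ≠ PySem.Str.slice key (some 1) none ∨ ¬ (1 ≤ i ∧ i ≤ 133) then none
      else some i

-- module_names[(i - 1) // 19]  (the index is in range whenever 1 <= i <= 133)
def pvModule (i : Int) : String :=
  (PySem.List.pyGet? pvModuleNames (PySem.Int.floordiv (i - 1) 19)).getD ""

def pvStepB (b : PySem.Dict String (List Int)) (key : String) : PySem.Dict String (List Int) :=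
  match pvParse? key with
  | none => b
  | some i => b.modify (pvModule i) [] (fun l => l ++ [i])

def pvBuckets (d : PySem.Dict String Int) : PySem.Dict String (List Int) :=
  d.keys.foldl pvStepB
    (pvModuleNames.foldl (fun b m => b.insert m ([] : List Int)) PySem.Dict.empty)

-- {"R{}".format(j): data["R{}".format(i)] for j, i in enumerate(idxs, 1)}
def pvRenumB (d : PySem.Dict String Int) (idxs : List Int) : PySem.Dict String Int :=
  (PySem.List.enumerate idxs 1).foldl
    (fun md p => md.insert (pvRkey p.1) (d.getD (pvRkey p.2) 0)) PySem.Dict.empty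

def group_registers_alt (data : List (String × Int)) : List (String × List (String × Int)) :=
  let d := PySem.Dict.ofList data
  (pvModuleNames.foldl
      (fun res m =>
        res.insert m (pvRenumB d (PySem.List.sorted ((pvBuckets d).getD m []) (fun x => x))))
      (PySem.Dict.empty : PySem.Dict String (PySem.Dict String Int))).items.map
    (fun p => (p.1, p.2.items))

-- ===== PRECONDITION & SPEC =====
def Spec_group_registers (data : List (String × Int)) (out : List (String × List (String × Int))) : Prop := out = group_registers_alt data
instance (data : List (String × Int)) (out : List (String × List (String × Int))) : Decidable (Spec_group_registers data out) := by unfold Spec_group_registers; infer_instance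

-- ===== CLAIM (what is proved, stated in full; the proofs are below) =====
def Claim_equal_group_registers : Prop := ∀ (data : List (String × Int)), Dom_group_registers data → Spec_group_registers data (group_registers data)

-- ===== LEMMAS AND PROOFS =====

-- the renumbered output list both inner builders produce
def pvOut (d : PySem.Dict String Int) (r : List Int) : List (String × Int) :=
  (PySem.List.enumerate r 1).map (fun p => (pvRkey p.1, d.getD (pvRkey p.2) 0))

-- the indices B's single pass collects for module m
def pvCollected (d : PySem.Dict String Int) (m : String) : List Int :=
  (d.keys.filterMap pvParse?).filter (fun i => pvModule i == m)

theorem pvRkey_toList (i : Int) : (pvRkey i).toList = 'R' :: (PySem.Int.toStr i).toList := by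
  simp [pvRkey, String.toList_append]

set_option maxRecDepth 100000 in
theorem pvRoundtrip133 : ∀ i ∈ PySem.List.pyRange 1 134 1,
    PySem.Int.ofStr? (PySem.Int.toStr i) = some i := by decide

theorem pvRoundtrip (i : Int) (h1 : 1 ≤ i) (h2 : i ≤ 133) :
    PySem.Int.ofStr? (PySem.Int.toStr i) = some i :=
  pvRoundtrip133 i (by rw [PySem.List.mem_pyRange_one]; omega)

theorem pvRkey_inj (a b : Int) (ha1 : 1 ≤ a) (ha2 : a ≤ 133) (hb1 : 1 ≤ b) (hb2 : b ≤ 133)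
    (h : pvRkey a = pvRkey b) : a = b := by
  have h' : (pvRkey a).toList = (pvRkey b).toList := by rw [h]
  rw [pvRkey_toList, pvRkey_toList] at h'
  have hts : PySem.Int.toStr a = PySem.Int.toStr b := String.ext (List.cons.inj h').2
  have hra := pvRoundtrip a ha1 ha2
  rw [hts, pvRoundtrip b hb1 hb2] at hra
  exact (Option.some.inj hra).symm

theorem pvSlice1_toList (k : String) :
    (PySem.Str.slice k none (some 1)).toList = k.toList.take 1 := by
  rw [PySem.Str.toList_slice, PySem.Chars.slice_eq_listSlice]
  rw [PySem.List.slice_to]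
  · rfl
  · norm_num

theorem pvSlice2_toList (k : String) :
    (PySem.Str.slice k (some 1) none).toList = k.toList.drop 1 := by
  rw [PySem.Str.toList_slice, PySem.Chars.slice_eq_listSlice]
  rw [PySem.List.slice_from]
  · rfl
  · norm_num

theorem pvSliceR1 (i : Int) : PySem.Str.slice (pvRkey i) none (some 1) = "R" := by
  apply String.ext
  rw [pvSlice1_toList, pvRkey_toList]
  rfl

theorem pvSliceR2 (i : Int) :
    PySem.Str.slice (pvRkey i) (some 1) none = PySem.Int.toStr i := by
  apply String.ext
  rw [pvSlice2_toList, pvRkey_toList]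
  rfl

theorem pvParse?_eq_some (k : String) (i : Int) :
    pvParse? k = some i ↔ (k = pvRkey i ∧ 1 ≤ i ∧ i ≤ 133) := by
  unfold pvParse?
  by_cases hs : PySem.Str.slice k none (some 1) = "R"
  · rw [if_neg (not_not_intro hs)]
    cases hof : PySem.Int.ofStr? (PySem.Str.slice k (some 1) none) with
    | none =>
      simp only []
      constructor
      · intro h; cases h
      · rintro ⟨hk, h1, h2⟩
        subst hk
        rw [pvSliceR2, pvRoundtrip i h1 h2] at hof
        cases hof
    | some i0 =>
      simp only []
      split_ifs with hcond
      · constructor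
        · intro h; cases h
        · rintro ⟨hk, h1, h2⟩
          subst hk
          rw [pvSliceR2] at hof hcond
          rw [pvRoundtrip i h1 h2] at hof
          have hi0 : i0 = i := (Option.some.inj hof).symm
          subst hi0
          rcases hcond with hc | hc
          · exact absurd rfl hc
          · exact absurd ⟨h1, h2⟩ hc
      · push Not at hcond
        obtain ⟨hts, hb⟩ := hcond
        constructor
        · intro h
          have hi0 : i0 = i := Option.some.inj h
          subst hi0
          refine ⟨?_, hb⟩
          apply String.ext
          rw [pvRkey_toList]
          have hk : k.toList = k.toList.take 1 ++ k.toList.drop 1 :=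
            (List.take_append_drop 1 k.toList).symm
          rw [hk, ← pvSlice1_toList, ← pvSlice2_toList, hs, ← hts]
          rfl
        · rintro ⟨hk, h1, h2⟩
          subst hk
          rw [pvSliceR2] at hof
          rw [pvRoundtrip i h1 h2] at hof
          exact hof.symm
  · rw [if_pos hs]
    constructor
    · intro h; cases h
    · rintro ⟨hk, h1, h2⟩
      subst hk
      exact absurd (pvSliceR1 i) hs

-- B's pass appends each accepted index to its module's bucket
theorem pvBuckets_fold (ks : List String) :
    ∀ (b : PySem.Dict String (List Int)) (m : String),
      (ks.foldl pvStepB b).getD m []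
        = b.getD m [] ++ ((ks.filterMap pvParse?).filter (fun i => pvModule i == m)) := by
  induction ks with
  | nil => intro b m; simp
  | cons k t ih =>
    intro b m
    rw [List.foldl_cons, List.filterMap_cons]
    cases hp : pvParse? k with
    | none =>
      rw [show pvStepB b k = b by simp [pvStepB, hp]]
      exact ih b m
    | some i =>
      rw [show pvStepB b k = b.modify (pvModule i) [] (fun l => l ++ [i]) by
        simp [pvStepB, hp]]
      rw [ih, PySem.Dict.getD_modify, List.filter_cons]
      by_cases hm : pvModule i = m
      · simp [hm]
      · rw [if_neg (fun hcontra => hm hcontra.symm)]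
        rw [beq_eq_false_iff_ne.mpr hm]
        simp

theorem pvB0_getD : ∀ m ∈ pvModuleNames,
    ((pvModuleNames.foldl (fun b m => b.insert m ([] : List Int)) PySem.Dict.empty).getD m [])
      = [] := by decide

theorem pvBuckets_getD (d : PySem.Dict String Int) (m : String) (hm : m ∈ pvModuleNames) :
    (pvBuckets d).getD m [] = pvCollected d m := by
  unfold pvBuckets pvCollected
  rw [pvBuckets_fold, pvB0_getD m hm, List.nil_append]

theorem pvCollected_mem (d : PySem.Dict String Int) (m : String) (i : Int) :
    i ∈ pvCollected d m ↔ (pvRkey i ∈ d.keys ∧ (1 ≤ i ∧ i ≤ 133) ∧ pvModule i = m) := by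
  unfold pvCollected
  simp only [List.mem_filter, List.mem_filterMap, pvParse?_eq_some, beq_iff_eq]
  constructor
  · rintro ⟨⟨k, hk, rfl, hb1, hb2⟩, hmod⟩
    exact ⟨hk, ⟨hb1, hb2⟩, hmod⟩
  · rintro ⟨hk, ⟨hb1, hb2⟩, hmod⟩
    exact ⟨⟨pvRkey i, hk, rfl, hb1, hb2⟩, hmod⟩

theorem pvCollected_nodup (d : PySem.Dict String Int) (m : String) (hnd : d.keys.Nodup) :
    (pvCollected d m).Nodup := by
  apply List.Nodup.filter
  apply List.Nodup.filterMap _ hnd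
  intro a a' b hb hb'
  rw [Option.mem_def, pvParse?_eq_some] at hb hb'
  rw [hb.1, hb'.1]

theorem pvModule_char (i : Int) (c : Int) (hc : (i - 1) / 19 = c) :
    pvModule i = (PySem.List.pyGet? pvModuleNames c).getD "" := by
  unfold pvModule
  rw [PySem.Int.floordiv_eq_ediv_of_pos (by norm_num), hc]

theorem pvModule_idx (i : Int) (h1 : 1 ≤ i) (h2 : i ≤ 133) (k : Int)
    (hk0 : 0 ≤ k) (hk6 : k ≤ 6)
    (hmod : pvModule i = (PySem.List.pyGet? pvModuleNames k).getD "") :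
    (i - 1) / 19 = k := by
  obtain ⟨c, hc0, hc6, hceq⟩ : ∃ c, 0 ≤ c ∧ c ≤ 6 ∧ (i - 1) / 19 = c :=
    ⟨(i - 1) / 19, by omega, by omega, rfl⟩
  rw [hceq]
  rw [pvModule_char i c hceq] at hmod
  interval_cases c <;> interval_cases k <;> first | rfl | exact absurd hmod (by decide)

theorem pvHm (m : String) (k lo hi : Int)
    (hk : (PySem.List.pyGet? pvModuleNames k).getD "" = m)
    (hrange : ∀ i, lo ≤ i → i < hi → (i - 1) / 19 = k) :
    ∀ i, lo ≤ i → i < hi → pvModule i = m :=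
  fun i hl hh => (pvModule_char i k (hrange i hl hh)).trans hk

theorem pvHm' (m : String) (k lo hi : Int) (hk0 : 0 ≤ k) (hk6 : k ≤ 6)
    (hk : (PySem.List.pyGet? pvModuleNames k).getD "" = m)
    (hrange : ∀ i, 1 ≤ i → i ≤ 133 → (i - 1) / 19 = k → lo ≤ i ∧ i < hi) :
    ∀ i, 1 ≤ i → i ≤ 133 → pvModule i = m → lo ≤ i ∧ i < hi :=
  fun i h1 h2 hmod =>
    hrange i h1 h2 (pvModule_idx i h1 h2 k hk0 hk6 (hmod.trans hk.symm))

-- A's inner loop over a range produces the renumbered output; key invariant: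
-- module_data's keys so far are exactly R1 .. R(new_index - 1)
theorem pvInnerA_fold (d : PySem.Dict String Int) (r : List Int) :
    ∀ (md : PySem.Dict String Int) (ni : Int),
      1 ≤ ni → ni + r.length ≤ 134 →
      md.keys = (PySem.List.pyRange 1 ni 1).map pvRkey →
      (r.foldl (pvStepA d) (md, ni)).1.items
        = md.items ++ (PySem.List.enumerate (r.filter (fun i => d.contains (pvRkey i))) ni).map
            (fun p => (pvRkey p.1, d.getD (pvRkey p.2) 0)) := by
  induction r with
  | nil => intro md ni _ _ _; simp [PySem.List.enumerate_nil]
  | cons i t ih =>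
    intro md ni h1 h2 hkeys
    rw [List.foldl_cons, List.filter_cons]
    by_cases hc : d.contains (pvRkey i) = true
    · have hni133 : ni ≤ 133 := by simp only [List.length_cons] at h2; omega
      have hfresh : md.contains (pvRkey ni) = false := by
        apply Bool.eq_false_iff.mpr
        intro hcon
        rw [PySem.Dict.contains_iff_mem_keys, hkeys, List.mem_map] at hcon
        obtain ⟨j, hj, hje⟩ := hcon
        rw [PySem.List.mem_pyRange_one] at hj
        have := pvRkey_inj j ni hj.1 (by omega) (by omega) hni133 hje
        omega
      have hk2 : (md.insert (pvRkey ni) (d.getD (pvRkey i) 0)).keys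
          = (PySem.List.pyRange 1 (ni + 1) 1).map pvRkey := by
        rw [PySem.Dict.keys_insert_of_not_contains _ _ hfresh, hkeys,
          PySem.List.pyRange_one_succ_right (show (1:Int) ≤ ni from h1),
          List.map_append]
        rfl
      rw [show pvStepA d (md, ni) i
            = (md.insert (pvRkey ni) (d.getD (pvRkey i) 0), ni + 1) by simp [pvStepA, hc]]
      rw [ih _ (ni + 1) (by omega)
        (by simp only [List.length_cons] at h2; omega) hk2]
      rw [PySem.Dict.items_insert_of_not_contains _ _ hfresh]
      rw [hc]
      simp [PySem.List.enumerate_cons]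
    · have hc' : d.contains (pvRkey i) = false := Bool.eq_false_iff.mpr hc
      rw [show pvStepA d (md, ni) i = (md, ni) by simp [pvStepA, hc'], hc']
      rw [if_neg (by simp)]
      exact ih md ni h1 (by simp only [List.length_cons] at h2; omega) hkeys

theorem pvInnerA_items (d : PySem.Dict String Int) (lo hi : Int)
    (hlo : 1 ≤ lo) (hhi : hi ≤ 134) :
    (pvInnerA d (PySem.List.pyRange lo hi 1)).1.items
      = pvOut d ((PySem.List.pyRange lo hi 1).filter (fun i => d.contains (pvRkey i))) := by
  unfold pvInnerA pvOut
  rw [pvInnerA_fold d _ PySem.Dict.empty 1 le_rfl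
    (by rw [PySem.List.length_pyRange_one]; omega)
    (by rw [PySem.List.pyRange_one_eq_nil le_rfl]; rfl)]
  exact List.nil_append _

theorem pvRenumB_items (d : PySem.Dict String Int) (idxs : List Int)
    (hlen : idxs.length ≤ 133) :
    (pvRenumB d idxs).items = pvOut d idxs := by
  have hnodup : ((PySem.List.enumerate idxs 1).map (fun p => pvRkey p.1)).Nodup := by
    rw [show (PySem.List.enumerate idxs 1).map (fun p => pvRkey p.1)
        = ((PySem.List.enumerate idxs 1).map (·.1)).map pvRkey from by
      rw [List.map_map]; rfl]
    rw [PySem.List.map_fst_enumerate]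
    apply List.Nodup.map_on _ (PySem.List.nodup_pyRange_one _ _)
    intro x hx y hy hxy
    rw [PySem.List.mem_pyRange_one] at hx hy
    have hxb : x ≤ 133 := by
      have := hx.2; have : (idxs.length : Int) ≤ 133 := by exact_mod_cast hlen
      omega
    have hyb : y ≤ 133 := by
      have := hy.2; have : (idxs.length : Int) ≤ 133 := by exact_mod_cast hlen
      omega
    exact pvRkey_inj x y hx.1 hxb hy.1 hyb hxy
  have h := PySem.Dict.items_foldl_insert_fresh (PySem.List.enumerate idxs 1)
    (fun p => pvRkey p.1) (fun p => d.getD (pvRkey p.2) 0) PySem.Dict.empty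
    (fun a _ => PySem.Dict.contains_empty _) hnodup
  unfold pvRenumB pvOut
  exact h.trans (List.nil_append _)

theorem pvPerModule (d : PySem.Dict String Int) (hnd : d.keys.Nodup) (m : String)
    (lo hi : Int) (hlo : 1 ≤ lo) (hhi : hi ≤ 134) (hmem : m ∈ pvModuleNames)
    (hm : ∀ i, lo ≤ i → i < hi → pvModule i = m)
    (hm' : ∀ i, 1 ≤ i → i ≤ 133 → pvModule i = m → lo ≤ i ∧ i < hi) :
    (pvRenumB d (PySem.List.sorted ((pvBuckets d).getD m []) (fun x => x))).items
      = (pvInnerA d (PySem.List.pyRange lo hi 1)).1.items := by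
  have hsort : PySem.List.sorted ((pvBuckets d).getD m []) (fun x => x)
      = (PySem.List.pyRange lo hi 1).filter (fun i => d.contains (pvRkey i)) := by
    rw [pvBuckets_getD d m hmem]
    apply PySem.List.sorted_eq_of_perm_of_pairwise_lt
    · rw [List.perm_ext_iff_of_nodup
        (List.Nodup.filter _ (PySem.List.nodup_pyRange_one _ _)) (pvCollected_nodup d m hnd)]
      intro i
      rw [List.mem_filter, PySem.List.mem_pyRange_one, pvCollected_mem,
        ← PySem.Dict.contains_iff_mem_keys]
      constructor
      · rintro ⟨⟨ha1, ha2⟩, hcont⟩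
        exact ⟨hcont, ⟨by omega, by omega⟩, hm i ha1 ha2⟩
      · rintro ⟨hcont, ⟨ha1, ha2⟩, hmod⟩
        exact ⟨hm' i ha1 ha2 hmod, hcont⟩
    · exact List.Pairwise.filter _ (PySem.List.pairwise_lt_pyRange_one _ _)
  rw [hsort, pvInnerA_items d lo hi hlo hhi]
  apply pvRenumB_items
  calc ((PySem.List.pyRange lo hi 1).filter (fun i => d.contains (pvRkey i))).length
      ≤ (PySem.List.pyRange lo hi 1).length := List.length_filter_le _ _
    _ ≤ 133 := by rw [PySem.List.length_pyRange_one]; omega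

theorem pvOuterA (d : PySem.Dict String Int) :
    (pvMapping.foldl (fun res mr => res.insert mr.1 (pvInnerA d mr.2).1)
        (PySem.Dict.empty : PySem.Dict String (PySem.Dict String Int))).items.map
      (fun p => (p.1, p.2.items))
      = pvMapping.map (fun mr => (mr.1, (pvInnerA d mr.2).1.items)) := by
  have h := PySem.Dict.items_foldl_insert_fresh pvMapping
    (fun mr => mr.1) (fun mr => (pvInnerA d mr.2).1)
    (PySem.Dict.empty : PySem.Dict String (PySem.Dict String Int))
    (fun a _ => PySem.Dict.contains_empty _) (by decide)
  have h2 := congrArg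
    (List.map (fun (p : String × PySem.Dict String Int) => (p.1, p.2.items))) h
  refine h2.trans ?_
  rw [show ((PySem.Dict.empty : PySem.Dict String (PySem.Dict String Int)).items
      ++ pvMapping.map (fun mr => (mr.1, (pvInnerA d mr.2).1)))
      = pvMapping.map (fun mr => (mr.1, (pvInnerA d mr.2).1)) from List.nil_append _]
  rw [List.map_map]
  rfl

theorem pvOuterB (f : String → PySem.Dict String Int) :
    (pvModuleNames.foldl (fun res m => res.insert m (f m))
        (PySem.Dict.empty : PySem.Dict String (PySem.Dict String Int))).items.map
      (fun p => (p.1, p.2.items))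
      = pvModuleNames.map (fun m => (m, (f m).items)) := by
  have h := PySem.Dict.items_foldl_insert_fresh pvModuleNames
    (fun m => m) f (PySem.Dict.empty : PySem.Dict String (PySem.Dict String Int))
    (fun a _ => PySem.Dict.contains_empty _) (by decide)
  have h2 := congrArg
    (List.map (fun (p : String × PySem.Dict String Int) => (p.1, p.2.items))) h
  refine h2.trans ?_
  rw [show ((PySem.Dict.empty : PySem.Dict String (PySem.Dict String Int)).items
      ++ pvModuleNames.map (fun m => (m, f m)))
      = pvModuleNames.map (fun m => (m, f m)) from List.nil_append _]
  rw [List.map_map]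
  rfl

-- ===== VERDICT (by name: the statement is the Claim_ definition above) =====
theorem group_registers_spec : Claim_equal_group_registers := by
  intro data _
  unfold Spec_group_registers
  have hnd : (PySem.Dict.ofList data).keys.Nodup := PySem.Dict.nodup_keys_ofList data
  have hA : group_registers data
      = pvMapping.map (fun mr => (mr.1, (pvInnerA (PySem.Dict.ofList data) mr.2).1.items)) :=
    pvOuterA (PySem.Dict.ofList data)
  have hB : group_registers_alt data
      = pvModuleNames.map (fun m =>
          (m, (pvRenumB (PySem.Dict.ofList data)
            (PySem.List.sorted ((pvBuckets (PySem.Dict.ofList data)).getD m [])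
              (fun x => x))).items)) :=
    pvOuterB (fun m =>
      pvRenumB (PySem.Dict.ofList data)
        (PySem.List.sorted ((pvBuckets (PySem.Dict.ofList data)).getD m []) (fun x => x)))
  rw [hA, hB]
  simp only [pvMapping, pvModuleNames, List.map_cons, List.map_nil, List.cons.injEq,
    Prod.mk.injEq, true_and, and_true]
  refine ⟨?_, ?_, ?_, ?_, ?_, ?_, ?_⟩
  · exact (pvPerModule _ hnd "M01" 1 20 (by norm_num) (by norm_num) (by decide)
      (pvHm "M01" 0 1 20 (by decide) (fun i hl hh => by omega))
      (pvHm' "M01" 0 1 20 (by norm_num) (by norm_num) (by decide)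
        (fun i h1 h2 hc => by omega))).symm
  · exact (pvPerModule _ hnd "M02" 20 39 (by norm_num) (by norm_num) (by decide)
      (pvHm "M02" 1 20 39 (by decide) (fun i hl hh => by omega))
      (pvHm' "M02" 1 20 39 (by norm_num) (by norm_num) (by decide)
        (fun i h1 h2 hc => by omega))).symm
  · exact (pvPerModule _ hnd "M09" 39 58 (by norm_num) (by norm_num) (by decide)
      (pvHm "M09" 2 39 58 (by decide) (fun i hl hh => by omega))
      (pvHm' "M09" 2 39 58 (by norm_num) (by norm_num) (by decide)
        (fun i h1 h2 hc => by omega))).symm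
  · exact (pvPerModule _ hnd "M10" 58 77 (by norm_num) (by norm_num) (by decide)
      (pvHm "M10" 3 58 77 (by decide) (fun i hl hh => by omega))
      (pvHm' "M10" 3 58 77 (by norm_num) (by norm_num) (by decide)
        (fun i h1 h2 hc => by omega))).symm
  · exact (pvPerModule _ hnd "M11" 77 96 (by norm_num) (by norm_num) (by decide)
      (pvHm "M11" 4 77 96 (by decide) (fun i hl hh => by omega))
      (pvHm' "M11" 4 77 96 (by norm_num) (by norm_num) (by decide)
        (fun i h1 h2 hc => by omega))).symm
  · exact (pvPerModule _ hnd "M12" 96 115 (by norm_num) (by norm_num) (by decide)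
      (pvHm "M12" 5 96 115 (by decide) (fun i hl hh => by omega))
      (pvHm' "M12" 5 96 115 (by norm_num) (by norm_num) (by decide)
        (fun i h1 h2 hc => by omega))).symm
  · exact (pvPerModule _ hnd "M13" 115 134 (by norm_num) (by norm_num) (by decide)
      (pvHm "M13" 6 115 134 (by decide) (fun i hl hh => by omega))
      (pvHm' "M13" 6 115 134 (by norm_num) (by norm_num) (by decide)
        (fun i h1 h2 hc => by omega))).symm
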